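-- pv_equiv track=rewrite | github.com/sedos-project/data_adapter | data_adapter/ontology.py | __check_quality_of_annotation
-- ===== SOURCE A (Python) =====
-- from enum import IntEnum
--
-- class AnnotationQuality(IntEnum):
--     NoAnnotation = 0
--     NameAnnotation = 1
--     OEOAnnotation = 2
--
-- class AnnotationError(Exception):
--     """Raised if annotation is corrupted."""
--
-- def get_name_from_ontology(oeo_path: str) -> str:
--     """Looks up ontology API and returns name of concept.
--
--     Parameters
--     ----------
--     oeo_path: str
--         URL to ontology concept
--
--     Returns
--     -------
--     str
--         Name of concept
--
--     Raises
--     ------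
--     AnnotationError
--         If concept is not found
--     """
--     # pylint: disable=W0125
--     if False:
--         # pylint: disable=W0511
--         return oeo_path  # FIXME: Read name from ontology
--     raise AnnotationError(f"No ontology concept found for {oeo_path=}.")
--
-- def __check_quality_of_annotation(annotation: list[dict[str, str]]) -> AnnotationQuality:
--     """Checks quality for given annotation.
--
--     Parameters
--     ----------
--     annotation: list[dict[str, str]]
--         Annotation (entry from "isAbout" or "subject") dict
--
--     Returns
--     -------
--     AnnotationQuality
--         Annotation quality of given annotation
--     """
--     qualities = set()
--     for entry in annotation:
--         if "path" in entry:
--             try: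
--                 get_name_from_ontology(entry["path"])
--             except AnnotationError:
--                 pass
--             finally:
--                 qualities.add(AnnotationQuality.OEOAnnotation)
--         elif "name" in entry and entry["name"]:
--             qualities.add(AnnotationQuality.NameAnnotation)
--         else:
--             qualities.add(AnnotationQuality.NoAnnotation)
--     if len(qualities) == 1:
--         return qualities.pop()
--     return AnnotationQuality(min(quality.value for quality in qualities))
-- ===== SOURCE B (Python) =====
-- from enum import IntEnum
--
-- class AnnotationQuality(IntEnum):
--     NoAnnotation = 0
--     NameAnnotation = 1
--     OEOAnnotation = 2
--
-- class AnnotationError(Exception):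
--     """Raised if annotation is corrupted."""
--
-- def get_name_from_ontology(oeo_path: str) -> str:
--     if False:
--         return oeo_path
--     raise AnnotationError(f"No ontology concept found for {oeo_path=}.")
--
-- def __check_quality_of_annotation(annotation):
--     # Staged boolean passes, best-to-worst short circuit turned around:
--     # if any entry carries no usable annotation at all, the quality is the minimum;
--     # otherwise any non-path entry caps the quality at NameAnnotation;
--     # otherwise every entry is ontology-annotated.
--     if any("path" not in entry and not entry.get("name") for entry in annotation):
--         return AnnotationQuality.NoAnnotation
--     if any("path" not in entry for entry in annotation):
--         return AnnotationQuality.NameAnnotation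
--     return AnnotationQuality.OEOAnnotation
-- ===== Notes on version B (the rewrite author's own statement) =====
-- stated objective: simpler
-- what changed: Replaced collecting per-entry quality levels into a set and taking its min (with a len==1/pop branch) by two staged existence tests: any unusable entry gives NoAnnotation, else any path-less entry gives NameAnnotation, else OEOAnnotation; no per-entry level values are ever materialised.
import Mathlib
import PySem

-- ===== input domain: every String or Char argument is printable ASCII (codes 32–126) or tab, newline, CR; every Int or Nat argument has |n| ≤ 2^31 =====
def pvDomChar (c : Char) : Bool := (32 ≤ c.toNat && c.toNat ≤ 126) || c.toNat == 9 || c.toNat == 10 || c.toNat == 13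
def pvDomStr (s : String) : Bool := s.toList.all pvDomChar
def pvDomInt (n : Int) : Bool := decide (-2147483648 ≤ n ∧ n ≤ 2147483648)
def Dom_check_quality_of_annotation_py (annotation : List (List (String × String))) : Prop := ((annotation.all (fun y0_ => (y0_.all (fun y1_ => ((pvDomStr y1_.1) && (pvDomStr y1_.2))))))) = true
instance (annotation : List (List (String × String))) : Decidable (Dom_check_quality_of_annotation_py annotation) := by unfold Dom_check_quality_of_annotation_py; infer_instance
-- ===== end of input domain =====

-- B replaces A's collect-a-set-of-levels-then-min by two staged existence tests
-- (any unannotated entry → 0, else any path-less entry → 1, else 2); return value only.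

-- ===== PORT A =====
-- A: collect the distinct qualities in a set, then pop if singleton else min.
-- get_name_from_ontology always raises AnnotationError, which A catches; the
-- try/except/finally therefore always adds OEOAnnotation (2) when "path" is a key.
def check_quality_of_annotation_py (annotation : List (List (String × String))) : Int :=
  let qualities : PySem.Set Int :=
    annotation.foldl (fun qs entry =>
      if (PySem.Dict.get? (PySem.Dict.ofList entry) "path").isSome then
        PySem.Set.add qs (2:Int)
      else
        match PySem.Dict.get? (PySem.Dict.ofList entry) "name" with
        | some v => if v ≠ "" then PySem.Set.add qs (1:Int) else PySem.Set.add qs (0:Int)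
        | none => PySem.Set.add qs (0:Int)) []
  if PySem.Set.len qualities == 1 then
    qualities.headD 0  -- set.pop() on a singleton set: its only element
  else
    match PySem.List.min? qualities (fun q => q) with
    | some m => m
    | none => 0  -- unreachable under Pre_ (empty annotation: Python raises ValueError)

-- ===== PORT B =====
def check_quality_of_annotation_py_alt (annotation : List (List (String × String))) : Int :=
  if annotation.any (fun entry =>
      !(PySem.Dict.get? (PySem.Dict.ofList entry) "path").isSome
        && (PySem.Dict.getD (PySem.Dict.ofList entry) "name" "" == "")) then 0
  else if annotation.any (fun entry =>
      !(PySem.Dict.get? (PySem.Dict.ofList entry) "path").isSome) then 1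
  else 2

-- ===== PRECONDITION & SPEC =====
-- On the empty list A raises ValueError (min of an empty iterable); B returns 2 there.
def Pre_check_quality_of_annotation_py (annotation : List (List (String × String))) : Prop :=
  annotation ≠ []
instance (annotation : List (List (String × String))) : Decidable (Pre_check_quality_of_annotation_py annotation) := by unfold Pre_check_quality_of_annotation_py; infer_instance

def pvWitness_check_quality_of_annotation_py : (List (List (String × String))) := [[("name", "x")]]

def Spec_check_quality_of_annotation_py (annotation : List (List (String × String))) (out : Int) : Prop := out = check_quality_of_annotation_py_alt annotation
instance (annotation : List (List (String × String))) (out : Int) : Decidable (Spec_check_quality_of_annotation_py annotation out) := by unfold Spec_check_quality_of_annotation_py; infer_instance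

-- ===== CLAIM =====
def Claim_equal_check_quality_of_annotation_py : Prop := ∀ (annotation : List (List (String × String))), Dom_check_quality_of_annotation_py annotation → Pre_check_quality_of_annotation_py annotation → Spec_check_quality_of_annotation_py annotation (check_quality_of_annotation_py annotation)

-- ===== LEMMAS AND PROOFS =====

-- proof-only helper: the quality level A's loop body adds for one entry
def quality_of_entry (entry : List (String × String)) : Int :=
  if (PySem.Dict.get? (PySem.Dict.ofList entry) "path").isSome then 2
  else if PySem.Dict.getD (PySem.Dict.ofList entry) "name" "" ≠ "" then 1
  else 0

-- A's per-entry branch adds exactly quality_of_entry to the set.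
theorem foldA_eq_ofList_map (annotation : List (List (String × String))) (s : PySem.Set Int) :
    annotation.foldl (fun qs entry =>
      if (PySem.Dict.get? (PySem.Dict.ofList entry) "path").isSome then
        PySem.Set.add qs (2:Int)
      else
        match PySem.Dict.get? (PySem.Dict.ofList entry) "name" with
        | some v => if v ≠ "" then PySem.Set.add qs (1:Int) else PySem.Set.add qs (0:Int)
        | none => PySem.Set.add qs (0:Int)) s
    = (annotation.map quality_of_entry).foldl PySem.Set.add s := by
  induction annotation generalizing s with
  | nil => rfl
  | cons e t ih =>
    simp only [List.foldl_cons, List.map_cons]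
    rw [← ih]
    congr 1
    unfold quality_of_entry
    by_cases hp : (PySem.Dict.get? (PySem.Dict.ofList e) "path").isSome
    · simp [hp]
    · simp only [hp, Bool.false_eq_true, ite_false]
      cases hn : PySem.Dict.get? (PySem.Dict.ofList e) "name" with
      | none => simp [PySem.Dict.getD, hn]
      | some v => by_cases hv : v = "" <;> simp [PySem.Dict.getD, hn, hv]

-- B's value is a member of the mapped quality list (nonempty input) …
theorem alt_mem (annotation : List (List (String × String))) (h : annotation ≠ []) :
    check_quality_of_annotation_py_alt annotation ∈ annotation.map quality_of_entry := by
  unfold check_quality_of_annotation_py_alt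
  by_cases h0 : annotation.any (fun entry =>
      !(PySem.Dict.get? (PySem.Dict.ofList entry) "path").isSome
        && (PySem.Dict.getD (PySem.Dict.ofList entry) "name" "" == "")) = true
  · simp only [h0, if_true]
    obtain ⟨e, he, hp⟩ := List.any_eq_true.mp h0
    refine List.mem_map.mpr ⟨e, he, ?_⟩
    simp only [Bool.and_eq_true, Bool.not_eq_true', beq_iff_eq] at hp
    unfold quality_of_entry
    simp [hp.1, hp.2]
  · simp only [h0]
    by_cases h1 : annotation.any (fun entry =>
        !(PySem.Dict.get? (PySem.Dict.ofList entry) "path").isSome) = true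
    · simp only [h1, if_true]
      obtain ⟨e, he, hp⟩ := List.any_eq_true.mp h1
      refine List.mem_map.mpr ⟨e, he, ?_⟩
      simp only [Bool.not_eq_true'] at hp
      have hname : ¬ PySem.Dict.getD (PySem.Dict.ofList e) "name" "" = "" := by
        intro hv
        exact h0 (List.any_eq_true.mpr ⟨e, he, by simp [hp, hv]⟩)
      unfold quality_of_entry
      simp [hp, hname]
    · simp only [h1]
      cases annotation with
      | nil => exact absurd rfl h
      | cons e t =>
        refine List.mem_map.mpr ⟨e, List.mem_cons_self, ?_⟩
        have hp : (PySem.Dict.get? (PySem.Dict.ofList e) "path").isSome = true := by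
          by_contra hp
          have hp' : (PySem.Dict.get? (PySem.Dict.ofList e) "path").isSome = false := by
            simpa using hp
          exact h1 (List.any_eq_true.mpr ⟨e, List.mem_cons_self, by simp [hp']⟩)
        unfold quality_of_entry
        simp [hp]

-- … and a lower bound for every quality level that occurs.
theorem alt_le (annotation : List (List (String × String))) :
    ∀ z ∈ annotation.map quality_of_entry, check_quality_of_annotation_py_alt annotation ≤ z := by
  intro z hz
  obtain ⟨e, he, rfl⟩ := List.mem_map.mp hz
  unfold check_quality_of_annotation_py_alt
  by_cases h0 : annotation.any (fun entry =>
      !(PySem.Dict.get? (PySem.Dict.ofList entry) "path").isSome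
        && (PySem.Dict.getD (PySem.Dict.ofList entry) "name" "" == "")) = true
  · simp only [h0, if_true]
    unfold quality_of_entry; split_ifs <;> omega
  · simp only [h0]
    by_cases h1 : annotation.any (fun entry =>
        !(PySem.Dict.get? (PySem.Dict.ofList entry) "path").isSome) = true
    · simp only [h1, if_true]
      unfold quality_of_entry
      by_cases hp : (PySem.Dict.get? (PySem.Dict.ofList e) "path").isSome
      · simp [hp]
      · have hname : ¬ PySem.Dict.getD (PySem.Dict.ofList e) "name" "" = "" := by
          intro hv
          have hp' : (PySem.Dict.get? (PySem.Dict.ofList e) "path").isSome = false := by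
            simpa using hp
          exact h0 (List.any_eq_true.mpr ⟨e, he, by simp [hp', hv]⟩)
        simp [hp, hname]
    · simp only [h1]
      have hp : (PySem.Dict.get? (PySem.Dict.ofList e) "path").isSome = true := by
        by_contra hp
        have hp' : (PySem.Dict.get? (PySem.Dict.ofList e) "path").isSome = false := by
          simpa using hp
        exact h1 (List.any_eq_true.mpr ⟨e, he, by simp [hp']⟩)
      unfold quality_of_entry
      simp [hp]

-- ===== VERDICT =====
theorem check_quality_of_annotation_py_spec : Claim_equal_check_quality_of_annotation_py := by
  intro annotation _ hpre
  unfold Spec_check_quality_of_annotation_py check_quality_of_annotation_py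
  rw [foldA_eq_ofList_map]
  set m := annotation.map quality_of_entry with hm
  have hset : ((m.foldl PySem.Set.add ([] : PySem.Set Int)) : List Int) = PySem.Set.ofList m := by
    rw [PySem.Set.ofList_eq_foldl]
  rw [hset]
  have hmem : ∀ z, z ∈ PySem.Set.ofList m ↔ z ∈ m := fun z => PySem.Set.mem_ofList m z
  have hbm : check_quality_of_annotation_py_alt annotation ∈ m := alt_mem annotation hpre
  by_cases hlen : PySem.Set.len (PySem.Set.ofList m) == 1
  · -- singleton set: its only element occurs in m, and B's value is in the set
    simp only [hlen, if_true]
    have hlen' : (PySem.Set.ofList m).length = 1 := by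
      simpa [PySem.Set.len] using (beq_iff_eq.mp hlen)
    obtain ⟨x, hx⟩ := List.length_eq_one_iff.mp hlen'
    rw [hx]
    have : check_quality_of_annotation_py_alt annotation ∈ PySem.Set.ofList m :=
      (hmem _).mpr hbm
    rw [hx] at this
    simp only [List.mem_singleton] at this
    simp [this]
  · simp only [hlen, if_false, Bool.false_eq_true]
    have hsne : PySem.Set.ofList m ≠ [] := by
      intro h
      have := (hmem _).mpr hbm
      simp [h] at this
    cases hA : PySem.List.min? (PySem.Set.ofList m) (fun q => q) with
    | none => exact absurd ((PySem.List.min?_eq_none_iff (PySem.Set.ofList m) (fun q => q)).mp hA) hsne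
    | some a =>
      have ha1 : a ∈ m := (hmem a).mp (PySem.List.min?_mem hA)
      have h1 := alt_le annotation a ha1
      have h2 := PySem.List.min?_isMin hA _ ((hmem _).mpr hbm)
      simp only at h2
      show a = check_quality_of_annotation_py_alt annotation
      omega
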